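-- pv_equiv track=rewrite | github.com/Arpafaucon/sp | sp_admiral/src/obs_map/src/support.py | get_ring_coordinates
-- ===== SOURCE A (Python) =====
-- def get_ring_coordinates(center_coord, ring_radius, array_dim):
--     """
--     list of coordinates of a Manhattan ring
--     coordinates are given clockwise
--
--     Args:
--         center_coord (tuple): [description]
--         ring_radius (int): [description]
--         array_dim (tuple): [description]
--
--     Returns:
--         [type]: [description]
--
--     Tests:
--     >>> get_ring_coordinates((5, 5), 2, (10, 10, 3))
--     [(3, 3), (3, 4), (3, 5), (3, 6), (3, 7), (4, 7), (5, 7), (6, 7), (7, 7), (7, 6), (7, 5), (7, 4), (7, 3), (6, 3), (5, 3), (4, 3)]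
--
--     # null radius
--     >>> get_ring_coordinates((5, 5), 0, (10, 10, 3))
--     [(5, 5)]
--
--     # corner
--     >>> get_ring_coordinates((0, 0), 2, (10, 10, 3))
--     [(0, 2), (1, 2), (2, 2), (2, 1), (2, 0)]
--
--     # flat image
--     >>> get_ring_coordinates((0, 0), 2, (10, 1, 3))
--     [(2, 0)]
--
--     >>> get_ring_coordinates((0,0), 2, (1,1,3))
--     []
--
--
--     """
--     assert len(
--         array_dim) >= 2, "expect at least two coordinates"
--     assert ring_radius >= 0
--     if ring_radius == 0:
--         return [center_coord]
--
--     h, w = array_dim[0:2]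
--     x, y = center_coord
--     top = [(x - ring_radius, y + j)
--            for j in range(-ring_radius, ring_radius+1)]
--     bottom = [(x + ring_radius, y - j)
--               for j in range(-ring_radius, ring_radius+1)]
--     left = [(x - i, y - ring_radius)
--             for i in range(-ring_radius+1, ring_radius)]
--     right = [(x + i, y + ring_radius)
--              for i in range(-ring_radius+1, ring_radius)]
--     total_nonfiltered = top + right + bottom + left
--     total_filtered = [(i, j) for i, j in total_nonfiltered if i >=
--                       0 and i < h and j >= 0 and j < w]
--     return total_filtered
-- ===== SOURCE B (Python) =====
-- def get_ring_coordinates(center_coord, ring_radius, array_dim):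
--     assert len(array_dim) >= 2, "expect at least two coordinates"
--     assert ring_radius >= 0
--     if ring_radius == 0:
--         return [center_coord]
--     h, w = array_dim[0], array_dim[1]
--     x, y = center_coord
--     i, j = x - ring_radius, y - ring_radius
--     result = []
--     for di, dj in ((0, 1), (1, 0), (0, -1), (-1, 0)):
--         for _ in range(2 * ring_radius):
--             if 0 <= i < h and 0 <= j < w:
--                 result.append((i, j))
--             i += di
--             j += dj
--     return result
-- ===== Notes on version B (the rewrite author's own statement) =====
-- stated objective: alternative
-- what changed: Replaces the four range-comprehensions (with corners handled by asymmetric ranges) plus a separate final filter pass by a single clockwise perimeter walk: a moving cursor steps 2*r times along each of the four direction vectors, collecting in-bounds points as it goes.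
import Mathlib
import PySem

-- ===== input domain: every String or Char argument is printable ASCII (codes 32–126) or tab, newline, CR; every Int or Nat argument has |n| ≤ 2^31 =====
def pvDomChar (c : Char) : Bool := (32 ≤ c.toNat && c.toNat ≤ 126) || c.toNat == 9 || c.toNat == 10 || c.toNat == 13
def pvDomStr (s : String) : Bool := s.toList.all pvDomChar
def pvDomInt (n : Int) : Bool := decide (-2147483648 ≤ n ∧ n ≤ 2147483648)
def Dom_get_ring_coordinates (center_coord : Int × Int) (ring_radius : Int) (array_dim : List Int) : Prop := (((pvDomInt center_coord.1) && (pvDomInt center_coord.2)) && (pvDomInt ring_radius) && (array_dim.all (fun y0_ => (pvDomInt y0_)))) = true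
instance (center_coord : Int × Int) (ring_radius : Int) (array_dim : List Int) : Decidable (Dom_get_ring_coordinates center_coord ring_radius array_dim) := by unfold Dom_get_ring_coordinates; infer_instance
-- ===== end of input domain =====

-- B replaces the four range-comprehensions + final filter by one clockwise perimeter walk
-- with a moving cursor (alternative decomposition, same cost).

-- ===== PORT A =====
def get_ring_coordinates (center_coord : Int × Int) (ring_radius : Int) (array_dim : List Int) : List (Int × Int) :=
  match array_dim with
  | h :: w :: _ =>            -- h, w = array_dim[0:2]; shorter lists fail A's assert (excluded by Pre_)
    if ring_radius < 0 then [] else   -- assert ring_radius >= 0 (excluded by Pre_)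
    if ring_radius = 0 then [center_coord] else
    let x := center_coord.1
    let y := center_coord.2
    let top := (PySem.List.pyRange (-ring_radius) (ring_radius+1) 1).map (fun j => (x - ring_radius, y + j))
    let bottom := (PySem.List.pyRange (-ring_radius) (ring_radius+1) 1).map (fun j => (x + ring_radius, y - j))
    let left := (PySem.List.pyRange (-ring_radius+1) ring_radius 1).map (fun i => (x - i, y - ring_radius))
    let right := (PySem.List.pyRange (-ring_radius+1) ring_radius 1).map (fun i => (x + i, y + ring_radius))
    let total_nonfiltered := top ++ right ++ bottom ++ left
    total_nonfiltered.filter (fun p => decide (0 ≤ p.1 ∧ p.1 < h ∧ 0 ≤ p.2 ∧ p.2 < w))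
  | _ => []

-- ===== PORT B =====
-- inner 'for _ in range(n)' loop of Source B: step the cursor n times in direction d,
-- appending each in-bounds visited point
def ringStep (h w : Int) (d : Int × Int) : Nat → (Int × Int) × List (Int × Int) → (Int × Int) × List (Int × Int)
  | 0, st => st
  | n+1, (p, acc) =>
    let acc' := if 0 ≤ p.1 ∧ p.1 < h ∧ 0 ≤ p.2 ∧ p.2 < w then acc ++ [p] else acc
    ringStep h w d n ((p.1 + d.1, p.2 + d.2), acc')

def get_ring_coordinates_alt (center_coord : Int × Int) (ring_radius : Int) (array_dim : List Int) : List (Int × Int) :=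
  if array_dim.length < 2 ∨ ring_radius < 0 then [] else   -- the two asserts (outside Pre_)
  if ring_radius = 0 then [center_coord] else
  let h := array_dim.getD 0 0   -- array_dim[0] (in range: length ≥ 2)
  let w := array_dim.getD 1 0   -- array_dim[1]
  (([((0:Int),(1:Int)), (1,0), (0,-1), (-1,0)]).foldl
    (fun st d => ringStep h w d (2*ring_radius).toNat st)
    ((center_coord.1 - ring_radius, center_coord.2 - ring_radius), [])).2

-- ===== PRECONDITION & SPEC =====
-- Pre_ excludes exactly the inputs on which A's two asserts raise AssertionError:
-- fewer than two dimensions, or a negative ring_radius.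
def Pre_get_ring_coordinates (center_coord : Int × Int) (ring_radius : Int) (array_dim : List Int) : Prop :=
  array_dim.length ≥ 2 ∧ 0 ≤ ring_radius
instance (center_coord : Int × Int) (ring_radius : Int) (array_dim : List Int) : Decidable (Pre_get_ring_coordinates center_coord ring_radius array_dim) := by unfold Pre_get_ring_coordinates; infer_instance
def pvWitness_get_ring_coordinates : (Int × Int) × Int × List Int := ((5, 5), 2, [10, 10, 3])

def Spec_get_ring_coordinates (center_coord : Int × Int) (ring_radius : Int) (array_dim : List Int) (out : List (Int × Int)) : Prop := out = get_ring_coordinates_alt center_coord ring_radius array_dim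
instance (center_coord : Int × Int) (ring_radius : Int) (array_dim : List Int) (out : List (Int × Int)) : Decidable (Spec_get_ring_coordinates center_coord ring_radius array_dim out) := by unfold Spec_get_ring_coordinates; infer_instance

-- ===== CLAIM (what is proved, stated in full; the proofs are below) =====
def Claim_equal_get_ring_coordinates : Prop := ∀ (center_coord : Int × Int) (ring_radius : Int) (array_dim : List Int), Dom_get_ring_coordinates center_coord ring_radius array_dim → Pre_get_ring_coordinates center_coord ring_radius array_dim → Spec_get_ring_coordinates center_coord ring_radius array_dim (get_ring_coordinates center_coord ring_radius array_dim)

-- ===== LEMMAS AND PROOFS =====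

-- closed form for one walk segment: visited points are start + k*d for k < n,
-- filtered in-bounds and appended to acc; the cursor ends at start + n*d.
lemma ringStep_spec (h w : Int) (d : Int × Int) (n : Nat) (p : Int × Int) (acc : List (Int × Int)) :
    ringStep h w d n (p, acc) =
      ((p.1 + n * d.1, p.2 + n * d.2),
       acc ++ ((List.range n).map (fun k : Nat => (p.1 + (k:Int) * d.1, p.2 + (k:Int) * d.2))).filter
         (fun q => decide (0 ≤ q.1 ∧ q.1 < h ∧ 0 ≤ q.2 ∧ q.2 < w))) := by
  induction n generalizing p acc with
  | zero => simp [ringStep]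
  | succ n ih =>
    rw [ringStep, ih]
    rw [List.range_succ_eq_map]
    have hmap : List.map (fun k : Nat => (p.1 + d.1 + (k:Int) * d.1, p.2 + d.2 + (k:Int) * d.2)) (List.range n)
        = List.map ((fun k : Nat => (p.1 + (k:Int) * d.1, p.2 + (k:Int) * d.2)) ∘ Nat.succ) (List.range n) := by
      apply List.map_congr_left; intro k _
      simp only [Function.comp, Prod.ext_iff]; constructor <;> push_cast <;> ring
    have hfst1 : p.1 + d.1 + (n:Int) * d.1 = p.1 + ((n+1 : Nat) : Int) * d.1 := by push_cast; ring
    have hfst2 : p.2 + d.2 + (n:Int) * d.2 = p.2 + ((n+1 : Nat) : Int) * d.2 := by push_cast; ring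
    simp only [List.map_cons, Nat.cast_zero, zero_mul, add_zero, List.filter_cons, hmap]
    by_cases hp : 0 ≤ p.1 ∧ p.1 < h ∧ 0 ≤ p.2 ∧ p.2 < w
    · simp [hp, hfst1, hfst2, Prod.ext_iff, List.append_assoc]
    · simp [hp, hfst1, hfst2, Prod.ext_iff]

-- step-1 ranges as List.range maps (instance of PySem.List.pyRange_of_pos)
lemma pyRange_one_closed (a b : Int) (hab : a < b) :
    PySem.List.pyRange a b 1 = (List.range (b - a).toNat).map (fun k : Nat => a + (k:Int)) := by
  rw [PySem.List.pyRange_of_pos a b Int.one_pos]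
  simp [hab]

lemma seg_glue {α : Type} (f g : Nat → α) (m : Nat) (h0 : f (m+1) = g 0) :
    (List.range (m+1+1)).map f ++ (List.range m).map (fun k => g (k+1)) =
    (List.range (m+1)).map f ++ (List.range (m+1)).map g := by
  have hg : (List.range (m+1)).map g = g 0 :: (List.range m).map (fun k => g (k+1)) := by
    rw [List.range_succ_eq_map]; simp [Function.comp_def]
  rw [List.range_succ, List.map_append, hg, ← h0]
  simp

lemma ring_glue {α : Type} (g1 g2 g3 g4 : Nat → α) (m : Nat)
    (h12 : g1 (m+1) = g2 0) (h34 : g3 (m+1) = g4 0) :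
    (List.range (m+1+1)).map g1 ++ ((List.range m).map (fun k => g2 (k+1)) ++
      ((List.range (m+1+1)).map g3 ++ (List.range m).map (fun k => g4 (k+1)))) =
    (List.range (m+1)).map g1 ++ ((List.range (m+1)).map g2 ++
      ((List.range (m+1)).map g3 ++ (List.range (m+1)).map g4)) := by
  have e12 := seg_glue g1 g2 m h12
  have e34 := seg_glue g3 g4 m h34
  simp only [← List.append_assoc]
  rw [e12, List.append_assoc ((List.range (m+1)).map g1 ++ (List.range (m+1)).map g2), e34]
  simp only [List.append_assoc]

theorem get_ring_coordinates_spec : Claim_equal_get_ring_coordinates := by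
  intro c r dims _ hpre
  unfold Spec_get_ring_coordinates
  obtain ⟨hlen, hr0⟩ := hpre
  match dims with
  | h :: w :: rest =>
    unfold get_ring_coordinates get_ring_coordinates_alt
    by_cases hr : r = 0
    · simp [hr]
    · have hrpos : 0 < r := lt_of_le_of_ne hr0 (Ne.symm hr)
      have hguard : ¬((h :: w :: rest).length < 2 ∨ r < 0) := by
        push_neg; refine ⟨?_, hr0⟩; simp
      simp only [if_neg (not_lt.mpr hr0), if_neg hr, if_neg hguard,
        List.getD_cons_zero, List.getD_cons_succ]
      -- B side: unfold the fold of four segments via ringStep_spec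
      obtain ⟨m, hm⟩ : ∃ m : Nat, (2*r).toNat = m + 1 := ⟨(2*r).toNat - 1, by omega⟩
      have hmr : ((m:Int) + 1) = 2 * r := by
        have := Int.toNat_of_nonneg (by omega : (0:Int) ≤ 2*r)
        omega
      set x := c.1
      set y := c.2
      simp only [List.foldl_cons, List.foldl_nil, hm, ringStep_spec]
      -- A side: ranges to List.range
      rw [pyRange_one_closed (-r) (r+1) (by omega), pyRange_one_closed (-r+1) r (by omega)]
      have h1 : (r + 1 - -r).toNat = (m + 1) + 1 := by omega
      have h2 : (r - (-r + 1)).toNat = m := by omega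
      rw [h1, h2]
      simp only [List.map_map]
      simp only [List.nil_append]
      simp only [← List.filter_append]
      congr 1
      -- canonicalize the eight raw segments
      have hT : List.map ((fun j => (x - r, y + j)) ∘ fun k : Nat => -r + (k:Int)) (List.range (m+1+1))
          = List.map (fun k : Nat => ((x - r : Int), y - r + (k:Int))) (List.range (m+1+1)) :=
        List.map_congr_left (fun k _ => by
          simp only [Function.comp_apply, Prod.mk.injEq]; constructor <;> push_cast <;> ring)
      have hR : List.map ((fun i => (x + i, y + r)) ∘ fun k : Nat => -r + 1 + (k:Int)) (List.range m)
          = List.map (fun k : Nat => (x - r + ((k+1 : Nat):Int), (y + r : Int))) (List.range m) :=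
        List.map_congr_left (fun k _ => by
          simp only [Function.comp_apply, Prod.mk.injEq]; constructor <;> push_cast <;> ring)
      have hB : List.map ((fun j => (x + r, y - j)) ∘ fun k : Nat => -r + (k:Int)) (List.range (m+1+1))
          = List.map (fun k : Nat => ((x + r : Int), y + r - (k:Int))) (List.range (m+1+1)) :=
        List.map_congr_left (fun k _ => by
          simp only [Function.comp_apply, Prod.mk.injEq]; constructor <;> push_cast <;> ring)
      have hL : List.map ((fun i => (x - i, y - r)) ∘ fun k : Nat => -r + 1 + (k:Int)) (List.range m)
          = List.map (fun k : Nat => (x + r - ((k+1 : Nat):Int), (y - r : Int))) (List.range m) :=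
        List.map_congr_left (fun k _ => by
          simp only [Function.comp_apply, Prod.mk.injEq]; constructor <;> push_cast <;> ring)
      have hS1 : List.map (fun k : Nat => (x - r + (k:Int) * 0, y - r + (k:Int) * 1)) (List.range (m+1))
          = List.map (fun k : Nat => ((x - r : Int), y - r + (k:Int))) (List.range (m+1)) :=
        List.map_congr_left (fun k _ => by
          simp only [Prod.mk.injEq]; constructor <;> push_cast <;> ring)
      have hS2 : List.map (fun k : Nat => (x - r + ((m+1 : Nat):Int) * 0 + (k:Int) * 1, y - r + ((m+1 : Nat):Int) * 1 + (k:Int) * 0)) (List.range (m+1))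
          = List.map (fun k : Nat => (x - r + (k:Int), (y + r : Int))) (List.range (m+1)) :=
        List.map_congr_left (fun k _ => by
          simp only [Prod.mk.injEq]; constructor <;> push_cast <;> omega)
      have hS3 : List.map (fun k : Nat => (x - r + ((m+1 : Nat):Int) * 0 + ((m+1 : Nat):Int) * 1 + (k:Int) * 0, y - r + ((m+1 : Nat):Int) * 1 + ((m+1 : Nat):Int) * 0 + (k:Int) * (-1))) (List.range (m+1))
          = List.map (fun k : Nat => ((x + r : Int), y + r - (k:Int))) (List.range (m+1)) :=
        List.map_congr_left (fun k _ => by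
          simp only [Prod.mk.injEq]; constructor <;> push_cast <;> omega)
      have hS4 : List.map (fun k : Nat => (x - r + ((m+1 : Nat):Int) * 0 + ((m+1 : Nat):Int) * 1 + ((m+1 : Nat):Int) * 0 + (k:Int) * (-1), y - r + ((m+1 : Nat):Int) * 1 + ((m+1 : Nat):Int) * 0 + ((m+1 : Nat):Int) * (-1) + (k:Int) * 0)) (List.range (m+1))
          = List.map (fun k : Nat => (x + r - (k:Int), (y - r : Int))) (List.range (m+1)) :=
        List.map_congr_left (fun k _ => by
          simp only [Prod.mk.injEq]; constructor <;> push_cast <;> omega)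
      rw [hT, hR, hB, hL, hS1, hS2, hS3, hS4]
      simp only [List.append_assoc]
      exact ring_glue (fun k : Nat => ((x - r : Int), y - r + (k:Int)))
        (fun k : Nat => (x - r + (k:Int), (y + r : Int)))
        (fun k : Nat => ((x + r : Int), y + r - (k:Int)))
        (fun k : Nat => (x + r - (k:Int), (y - r : Int))) m
        (by simp only [Prod.mk.injEq]; constructor <;> push_cast <;> omega)
        (by simp only [Prod.mk.injEq]; constructor <;> push_cast <;> omega)
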